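-- pv_equiv track=rewrite | github.com/PARK9YUR1/Algorithm_Python | 프로그래머스/2/72411. 메뉴 리뉴얼/메뉴 리뉴얼.py | solution
-- ===== SOURCE A (Python) =====
-- from itertools import combinations
--
-- def solution(orders, courses):
--     answer = []
--
--     foods = []
--     orders.sort(key=lambda x:len(x))
--     for order in orders:
--         food = [o for o in order]
--         food.sort()
--         foods.append(food)
--
--     for course in courses:
--         comb = {}
--         for food in foods:
--             if len(food) >= course:
--                 arr = list(combinations(food, course))
--                 for a in arr:
--                     if a in comb:
--                         comb[a] +=1
--                     else:
--                         comb[a] = 1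
--
--         if comb:
--             mx = max(comb.values())
--             mxs = [''.join(k) for k, v in comb.items() if v == mx and v != 1]
--             answer += mxs
--
--     answer.sort()
--     return answer
-- ===== SOURCE B (Python) =====
-- from itertools import combinations
--
-- def solution(orders, courses):
--     # Sort-then-scan instead of hash counting: per course, all combos are
--     # collected into one list, sorted, and a run-length scan of the sorted
--     # list finds the most frequent ones.  (Does not mutate `orders`; the
--     # equivalence is about the return value.)
--     foods = [sorted(order) for order in orders]
--     answer = []
--     for course in courses:
--         combos = []
--         for food in foods:
--             if len(food) >= course:
--                 combos.extend(combinations(food, course))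
--         combos.sort()
--         i, n = 0, len(combos)
--         best, runs = 1, []
--         while i < n:
--             j = i
--             while j < n and combos[j] == combos[i]:
--                 j += 1
--             run = j - i
--             if run > best:
--                 best, runs = run, [combos[i]]
--             elif run == best and run > 1:
--                 runs.append(combos[i])
--             i = j
--         answer += [''.join(t) for t in runs]
--     answer.sort()
--     return answer
-- ===== Notes on version B (the rewrite author's own statement) =====
-- stated objective: alternative
-- what changed: A counts each course's combinations in a hash table (dict with membership test) and scans the whole dict for the maximum; B uses no dict at all: per course it collects all combinations into one list, sorts it, and finds the most frequent combos by a two-pointer run-length scan of the sorted list (sort-then-scan vs hash counting). B also does not mutate the caller's `orders` list.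
import Mathlib
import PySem

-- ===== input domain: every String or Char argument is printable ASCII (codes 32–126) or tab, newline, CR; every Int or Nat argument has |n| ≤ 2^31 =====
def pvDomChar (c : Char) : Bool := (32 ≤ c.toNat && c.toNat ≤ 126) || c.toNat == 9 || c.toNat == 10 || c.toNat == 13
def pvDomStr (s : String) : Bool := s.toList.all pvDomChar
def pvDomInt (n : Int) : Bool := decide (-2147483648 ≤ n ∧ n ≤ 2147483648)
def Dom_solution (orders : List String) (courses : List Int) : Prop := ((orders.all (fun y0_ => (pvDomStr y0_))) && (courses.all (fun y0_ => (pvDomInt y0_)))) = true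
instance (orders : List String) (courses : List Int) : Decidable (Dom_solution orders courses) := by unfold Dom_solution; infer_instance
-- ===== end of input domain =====

-- B replaces A's per-course dict counting (hash table of combination frequencies) by a
-- dict-free sort-then-scan: per course all combinations are collected, sorted, and a
-- run-length scan of the sorted list finds the most frequent ones.  NOTE: Python A sorts
-- the caller's `orders` list in place (B does not); the equivalence proved here is about
-- the return value.

-- ===== PORT A =====
-- foods: orders sorted by length, each order's characters sorted (Python's two leading loops)
def foodsA (orders : List String) : List (List Char) :=
  (PySem.List.sorted orders (fun x => PySem.Str.len x)).foldl
    (fun foods order => foods ++ [PySem.List.sorted order.toList (fun c => c)]) []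

-- per-course dict:  'if a in comb: comb[a] += 1 else: comb[a] = 1'  is  Dict.modify a 0 (· + 1)
def combDictA (foods : List (List Char)) (course : Int) : PySem.Dict (List Char) Int :=
  foods.foldl (fun comb food =>
    if course ≤ (food.length : Int) then
      (PySem.List.combinations food course.toNat).foldl
        (fun comb a => comb.modify a 0 (· + 1)) comb
    else comb) PySem.Dict.empty

-- mxs = [''.join(k) for k, v in comb.items() if v == mx and v != 1]  (mx = max(comb.values()))
def mxsA (comb : PySem.Dict (List Char) Int) : List String :=
  match PySem.List.max? comb.values (fun v => v) with
  | some mx => (comb.items.filter (fun kv => kv.2 == mx && kv.2 != 1)).map (fun kv => String.ofList kv.1)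
  | none => []

def solution (orders : List String) (courses : List Int) : List String :=
  let foods := foodsA orders
  let answer := courses.foldl (fun answer course =>
    let comb := combDictA foods course
    if comb.items.isEmpty then answer else answer ++ mxsA comb) []
  PySem.List.sorted answer (fun s => s)

-- ===== PORT B =====
-- foods = [sorted(order) for order in orders]
def foodsB (orders : List String) : List (List Char) :=
  orders.map (fun o => PySem.List.sorted o.toList (fun c => c))

-- the per-course combo list (the 'combos.extend(...)' loop)
def combosB (foods : List (List Char)) (course : Int) : List (List Char) :=
  foods.foldl (fun combos food =>
    if course ≤ (food.length : Int) then
      combos ++ PySem.List.combinations food course.toNat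
    else combos) []

-- the two-pointer run-length scan of the sorted combo list (the while loops);
-- the inner 'while j < n and combos[j] == combos[i]' is the span over the tail
def scanB : List (List Char) → Int → List (List Char) → Int × List (List Char)
  | [], best, runs => (best, runs)
  | x :: xs, best, runs =>
    let s := xs.span (fun y => y == x)
    let run : Int := (s.1.length : Int) + 1
    if best < run then scanB s.2 run [x]
    else if run == best && 1 < run then scanB s.2 best (runs ++ [x])
    else scanB s.2 best runs
  termination_by l _ _ => l.length
  decreasing_by
    all_goals
      simp only [List.span_eq_takeWhile_dropWhile]
      have := (List.dropWhile_sublist (p := fun y => y == x) (l := xs)).length_le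
      simp only [List.length_cons]
      omega

def solution_alt (orders : List String) (courses : List Int) : List String :=
  let foods := foodsB orders
  let answer := courses.foldl (fun answer course =>
    let combos := PySem.List.sorted (combosB foods course) (fun t => t)
    answer ++ (scanB combos 1 []).2.map String.ofList) []
  PySem.List.sorted answer (fun s => s)

-- ===== PRECONDITION & SPEC =====
-- Pre_ excludes only inputs where A raises: a negative course value with a nonempty `orders`
-- makes Python's combinations(food, course) raise ValueError (B raises there too).
def Pre_solution (orders : List String) (courses : List Int) : Prop :=
  orders = [] ∨ ∀ c ∈ courses, 0 ≤ c
instance (orders : List String) (courses : List Int) : Decidable (Pre_solution orders courses) := by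
  unfold Pre_solution; infer_instance

def pvWitness_solution : List String × List Int := (["AB", "AB"], [2])

def Spec_solution (orders : List String) (courses : List Int) (out : List String) : Prop := out = solution_alt orders courses
instance (orders : List String) (courses : List Int) (out : List String) : Decidable (Spec_solution orders courses out) := by unfold Spec_solution; infer_instance

-- ===== CLAIM (what is proved, stated in full; the proofs are below) =====
def Claim_equal_solution : Prop := ∀ (orders : List String) (courses : List Int), Dom_solution orders courses → Pre_solution orders courses → Spec_solution orders courses (solution orders courses)

-- ===== LEMMAS AND PROOFS =====

-- chars of an order, sorted (shared subexpression of both ports)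
def sortC (o : String) : List Char := PySem.List.sorted o.toList (fun c => c)

-- the stream of all size-r combinations drawn from a list of orders
def strm (orders : List String) (r : Nat) : List (List Char) :=
  orders.flatMap (fun o => PySem.List.combinations (sortC o) r)

-- the per-course contribution of A (resp. B) to `answer`
def gA (orders : List String) (course : Int) : List String :=
  let comb := combDictA (foodsA orders) course
  if comb.items.isEmpty then [] else mxsA comb

def gB (orders : List String) (course : Int) : List String :=
  (scanB (PySem.List.sorted (combosB (foodsB orders) course) (fun t => t)) 1 []).2.map
    String.ofList

-- proof-only: the maximal runs of a list, via the same span recursion as scanB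
def runsL : List (List Char) → List (List Char × Int)
  | [] => []
  | x :: xs =>
    let s := xs.span (fun y => y == x)
    (x, (s.1.length : Int) + 1) :: runsL s.2
  termination_by l => l.length
  decreasing_by
    simp only [List.span_eq_takeWhile_dropWhile]
    have := (List.dropWhile_sublist (p := fun y => y == x) (l := xs)).length_le
    simp only [List.length_cons]
    omega

-- one step of the scan, as a fold over the runs
def stepS (p : Int × List (List Char)) (kc : List Char × Int) : Int × List (List Char) :=
  if p.1 < kc.2 then (kc.2, [kc.1])
  else if kc.2 == p.1 && 1 < kc.2 then (p.1, p.2 ++ [kc.1])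
  else p

-- running maximum of the counts
def Mfold (ps : List (List Char × Int)) (b : Int) : Int :=
  ps.foldl (fun m kc => max m kc.2) b

-- a fold that appends a per-element block is a flatMap
lemma foldl_out {α β : Type} (l : List α) (f : List β → α → List β) (g : α → List β)
    (h : ∀ acc x, f acc x = acc ++ g x) : l.foldl f [] = l.flatMap g := by
  rw [show f = fun acc x => acc ++ g x from funext fun a => funext fun x => h a x,
    PySem.List.foldl_append_eq_flatMap, List.nil_append]

lemma solution_eq_flatMap (orders : List String) (courses : List Int) :
    solution orders courses = PySem.List.sorted (courses.flatMap (gA orders)) (fun s => s) := by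
  simp only [solution]
  congr 1
  apply foldl_out
  intro acc course
  simp only [gA]
  split <;> simp

lemma alt_eq_flatMap (orders : List String) (courses : List Int) :
    solution_alt orders courses
      = PySem.List.sorted (courses.flatMap (gB orders)) (fun s => s) := by
  simp only [solution_alt]
  congr 1
  apply foldl_out
  intro acc course
  rfl

lemma foodsA_eq_map (orders : List String) :
    foodsA orders
      = (PySem.List.sorted orders (fun x => PySem.Str.len x)).map sortC := by
  simp only [foodsA, PySem.List.foldl_append_singleton_eq_map, List.nil_append]
  rfl

lemma combDictA_eq_counter (orders : List String) (course : Int) (h0 : 0 ≤ course) :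
    combDictA (foodsA orders) course
      = PySem.Dict.counter (strm (PySem.List.sorted orders (fun x => PySem.Str.len x)) course.toNat) := by
  rw [foodsA_eq_map]
  simp only [combDictA, strm, PySem.Dict.counter_eq_foldl, List.foldl_flatMap, List.foldl_map]
  apply PySem.List.foldl_congr_mem
  intro comb o _
  split
  · rfl
  · rename_i hlt
    rw [PySem.List.combinations_eq_nil_of_length_lt]
    · rfl
    · simp only [sortC] at *
      have := PySem.List.length_sorted (xs := o.toList) (key := fun c => c) (rev := false)
      omega

lemma combosB_eq_strm (orders : List String) (course : Int) (h0 : 0 ≤ course) :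
    combosB (foodsB orders) course = strm orders course.toNat := by
  simp only [combosB, foodsB, strm, List.foldl_map]
  apply foldl_out
  intro acc o
  split
  · rfl
  · rename_i hlt
    rw [PySem.List.combinations_eq_nil_of_length_lt, List.append_nil]
    simp only [sortC] at *
    omega

lemma span_head_all (x : List Char) (xs : List (List Char)) :
    ∀ z ∈ (xs.span (fun y => y == x)).1, z = x := by
  intro z hz
  rw [List.span_eq_takeWhile_dropWhile] at hz
  have := List.mem_takeWhile_imp hz
  simpa using this

lemma span_tail_sorted (x : List Char) (xs : List (List Char))
    (hs : xs.Pairwise (· ≤ ·)) : ((xs.span (fun y => y == x)).2).Pairwise (· ≤ ·) := by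
  rw [List.span_eq_takeWhile_dropWhile]
  exact hs.sublist (List.dropWhile_sublist _)

lemma span_tail_not_mem (x : List Char) (xs : List (List Char))
    (hx : ∀ z ∈ xs, x ≤ z) (hs : xs.Pairwise (· ≤ ·)) :
    x ∉ (xs.span (fun y => y == x)).2 := by
  rw [List.span_eq_takeWhile_dropWhile]
  intro hmem
  rcases hd : xs.dropWhile (fun y => y == x) with _ | ⟨y, ys⟩
  · rw [hd] at hmem; cases hmem
  · have hy : (y == x) = false := by
      have h0 := List.head_dropWhile_not (fun y => y == x) (l := xs) (by rw [hd]; simp)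
      simpa [hd] using h0
    have hyx : y ≠ x := by simpa using hy
    have hysub : (y :: ys).Sublist xs := hd ▸ List.dropWhile_sublist _
    have hxy : x ≤ y := hx y (hysub.subset (List.mem_cons_self ..))
    have hsorted : (y :: ys).Pairwise (· ≤ ·) := hs.sublist hysub
    rw [hd] at hmem
    rcases List.mem_cons.mp hmem with h | h
    · exact hyx h.symm
    · have hyz : y ≤ x := (List.pairwise_cons.mp hsorted).1 x h
      exact hyx (le_antisymm hyz hxy)

lemma count_span (x : List Char) (xs : List (List Char))
    (hx : ∀ z ∈ xs, x ≤ z) (hs : xs.Pairwise (· ≤ ·)) :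
    (x :: xs).count x = (xs.span (fun y => y == x)).1.length + 1 := by
  have hnm := span_tail_not_mem x xs hx hs
  have hxs : xs = (xs.span (fun y => y == x)).1 ++ (xs.span (fun y => y == x)).2 := by
    rw [List.span_eq_takeWhile_dropWhile]; exact (List.takeWhile_append_dropWhile).symm
  rw [List.count_cons_self]
  conv_lhs => rw [hxs]
  rw [List.count_append]
  have h1 : (xs.span (fun y => y == x)).1.count x = (xs.span (fun y => y == x)).1.length := by
    apply List.count_eq_length.mpr
    intro z hz
    exact ((span_head_all x xs z hz).symm ▸ rfl)
  have h2 : (xs.span (fun y => y == x)).2.count x = 0 := List.count_eq_zero.mpr hnm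
  omega

lemma count_span_tail (x k : List Char) (xs : List (List Char))
    (hk : k ∈ (xs.span (fun y => y == x)).2)
    (hx : ∀ z ∈ xs, x ≤ z) (hs : xs.Pairwise (· ≤ ·)) :
    (x :: xs).count k = (xs.span (fun y => y == x)).2.count k := by
  have hnm := span_tail_not_mem x xs hx hs
  have hkx : k ≠ x := fun h => hnm (h ▸ hk)
  have hxs : xs = (xs.span (fun y => y == x)).1 ++ (xs.span (fun y => y == x)).2 := by
    rw [List.span_eq_takeWhile_dropWhile]; exact (List.takeWhile_append_dropWhile).symm
  rw [List.count_cons_of_ne (Ne.symm hkx)]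
  conv_lhs => rw [hxs]
  rw [List.count_append]
  have h1 : (xs.span (fun y => y == x)).1.count k = 0 := by
    apply List.count_eq_zero.mpr
    intro hzm
    exact hkx (span_head_all x xs k hzm)
  omega

-- ---- runsL characterisation on sorted lists ----

lemma runsL_pos (l : List (List Char)) : ∀ p ∈ runsL l, 1 ≤ p.2 := by
  induction l using runsL.induct with
  | case1 => intro p hp; simp [runsL] at hp
  | case2 x xs s ih =>
    intro p hp
    rw [runsL] at hp
    rcases List.mem_cons.mp hp with h | h
    · subst h; simp
    · exact ih p h

lemma runsL_keys_mem (l : List (List Char)) :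
    ∀ p ∈ runsL l, p.1 ∈ l := by
  induction l using runsL.induct with
  | case1 => intro p hp; simp [runsL] at hp
  | case2 x xs s ih =>
    intro p hp
    rw [runsL] at hp
    rcases List.mem_cons.mp hp with h | h
    · subst h; exact (List.mem_cons_self ..)
    · have hsub : s.2.Sublist xs := by
        simp only [s, List.span_eq_takeWhile_dropWhile]
        exact List.dropWhile_sublist _
      exact List.mem_cons_of_mem _ (hsub.subset (ih p h))

lemma sorted_head_le (x : List Char) (xs : List (List Char))
    (hs : (x :: xs).Pairwise (· ≤ ·)) : ∀ z ∈ xs, x ≤ z :=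
  (List.pairwise_cons.mp hs).1

lemma runsL_mem_iff (l : List (List Char)) (hs : l.Pairwise (· ≤ ·)) (k : List Char) (c : Int) :
    (k, c) ∈ runsL l ↔ k ∈ l ∧ c = (l.count k : Int) := by
  induction l using runsL.induct with
  | case1 => simp [runsL]
  | case2 x xs s ih =>
    have hx := sorted_head_le x xs hs
    have hxs : xs.Pairwise (· ≤ ·) := (List.pairwise_cons.mp hs).2
    have hsorted2 := span_tail_sorted x xs hxs
    have hnm := span_tail_not_mem x xs hx hxs
    have hsplit : xs = s.1 ++ s.2 := by
      simp only [s, List.span_eq_takeWhile_dropWhile]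
      exact (List.takeWhile_append_dropWhile).symm
    rw [runsL]
    constructor
    · intro hp
      rcases List.mem_cons.mp hp with h | h
      · cases h
        refine ⟨(List.mem_cons_self ..), ?_⟩
        rw [count_span _ xs hx hxs]
        push_cast
        ring
      · have := (ih hsorted2 ).mp h
        obtain ⟨hkm, hc⟩ := this
        refine ⟨?_, ?_⟩
        · have hsub : s.2.Sublist xs := by
            simp only [s, List.span_eq_takeWhile_dropWhile]; exact List.dropWhile_sublist _
          exact List.mem_cons_of_mem _ (hsub.subset hkm)
        · rw [count_span_tail x k xs hkm hx hxs]; exact hc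
    · rintro ⟨hkm, hc⟩
      by_cases hkx : k = x
      · subst hkx
        have hceq : c = (s.1.length : Int) + 1 := by
          rw [count_span k xs hx hxs] at hc
          push_cast at hc
          omega
        subst hceq
        exact (List.mem_cons_self ..)
      · right
        have hkxs : k ∈ xs := by
          rcases List.mem_cons.mp hkm with h | h
          · exact absurd h hkx
          · exact h
        have hk2 : k ∈ s.2 := by
          rw [hsplit] at hkxs
          rcases List.mem_append.mp hkxs with h | h
          · exact absurd (span_head_all x xs k h) hkx
          · exact h
        apply (ih hsorted2).mpr
        refine ⟨hk2, ?_⟩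
        rw [← count_span_tail x k xs hk2 hx hxs]
        exact hc

lemma runsL_keys_nodup (l : List (List Char)) (hs : l.Pairwise (· ≤ ·)) :
    ((runsL l).map Prod.fst).Nodup := by
  induction l using runsL.induct with
  | case1 => simp [runsL]
  | case2 x xs s ih =>
    have hx := sorted_head_le x xs hs
    have hxs : xs.Pairwise (· ≤ ·) := (List.pairwise_cons.mp hs).2
    have hsorted2 := span_tail_sorted x xs hxs
    have hnm := span_tail_not_mem x xs hx hxs
    rw [runsL]
    simp only [List.map_cons, List.nodup_cons]
    refine ⟨?_, ih hsorted2⟩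
    intro hmem
    obtain ⟨p, hp, hpeq⟩ := List.mem_map.mp hmem
    have h1 : p.1 ∈ s.2 := runsL_keys_mem s.2 p hp
    rw [hpeq] at h1
    exact hnm h1

lemma runsL_nodup (l : List (List Char)) (hs : l.Pairwise (· ≤ ·)) :
    (runsL l).Nodup := (runsL_keys_nodup l hs).of_map

-- ---- scanB = fold of stepS over runsL ----

lemma scanB_eq_foldl (l : List (List Char)) (b : Int) (r : List (List Char)) :
    scanB l b r = (runsL l).foldl stepS (b, r) := by
  induction l using runsL.induct generalizing b r with
  | case1 => rw [scanB, runsL]; rfl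
  | case2 x xs s ih =>
    rw [scanB, runsL]
    simp only [List.foldl_cons]
    rw [show stepS (b, r) (x, (s.1.length : Int) + 1)
        = if b < (s.1.length : Int) + 1 then (((s.1.length : Int) + 1), [x])
          else if ((s.1.length : Int) + 1) == b && 1 < ((s.1.length : Int) + 1) then (b, r ++ [x])
          else (b, r) from rfl]
    split
    · exact ih _ _
    · split
      · exact ih _ _
      · exact ih _ _

-- ---- the fold's closed form ----

lemma Mfold_le_init (ps : List (List Char × Int)) (b : Int) : b ≤ Mfold ps b := by
  induction ps generalizing b with
  | nil => simp [Mfold]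
  | cons p tl ih =>
    simp only [Mfold, List.foldl_cons]
    exact le_trans (le_max_left b p.2) (ih (max b p.2))

lemma Mfold_mem_le (ps : List (List Char × Int)) (b : Int) :
    ∀ p ∈ ps, p.2 ≤ Mfold ps b := by
  induction ps generalizing b with
  | nil => intro p hp; cases hp
  | cons q tl ih =>
    intro p hp
    simp only [Mfold, List.foldl_cons]
    rcases List.mem_cons.mp hp with h | h
    · subst h
      exact le_trans (le_max_right b p.2) (Mfold_le_init tl (max b p.2))
    · exact ih (max b q.2) p h

lemma Mfold_cases (ps : List (List Char × Int)) (b : Int) :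
    Mfold ps b = b ∨ ∃ p ∈ ps, Mfold ps b = p.2 := by
  induction ps generalizing b with
  | nil => left; rfl
  | cons q tl ih =>
    have hM : Mfold (q :: tl) b = Mfold tl (max b q.2) := rfl
    rw [hM]
    rcases ih (max b q.2) with h | ⟨p, hp, hpe⟩
    · rcases le_or_gt q.2 b with hle | hlt
      · left; rw [h]; exact max_eq_left hle
      · right; exact ⟨q, (List.mem_cons_self ..), by rw [h]; exact max_eq_right (le_of_lt hlt)⟩
    · right; exact ⟨p, List.mem_cons_of_mem _ hp, hpe⟩

lemma foldl_stepS_spec (ps : List (List Char × Int)) (b : Int) (r : List (List Char))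
    (hpos : ∀ p ∈ ps, 1 ≤ p.2) (hb : 1 ≤ b) (hb1 : b = 1 → r = []) :
    ps.foldl stepS (b, r)
      = (Mfold ps b,
         (if Mfold ps b = b then r else [])
           ++ (ps.filter (fun kc => kc.2 == Mfold ps b && Mfold ps b != 1)).map Prod.fst) := by
  induction ps generalizing b r with
  | nil => simp [Mfold]
  | cons kc tl ih =>
    obtain ⟨k, c⟩ := kc
    have hc1 : 1 ≤ c := hpos (k, c) (List.mem_cons_self ..)
    have hposT : ∀ p ∈ tl, 1 ≤ p.2 := fun p hp => hpos p (List.mem_cons_of_mem _ hp)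
    have hM : Mfold ((k, c) :: tl) b = Mfold tl (max b c) := rfl
    simp only [List.foldl_cons]
    by_cases hbc : b < c
    · rw [show stepS (b, r) (k, c) = (c, [k]) from by simp [stepS, hbc]]
      have hmaxbc : max b c = c := by omega
      rw [ih c [k] hposT (by omega) (by omega)]
      have hMbig : c ≤ Mfold tl c := Mfold_le_init tl c
      have hMne1 : Mfold tl c ≠ 1 := by omega
      have hMneb : Mfold tl c ≠ b := by omega
      rw [hM, hmaxbc, if_neg hMneb]
      simp only [List.filter_cons]
      by_cases heq : Mfold tl c = c
      · rw [if_pos heq,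
          if_pos (show (c == Mfold tl c && Mfold tl c != 1) = true by
            simp only [Bool.and_eq_true, beq_iff_eq, bne_iff_ne]
            omega)]
        simp
      · rw [if_neg heq,
          if_neg (show ¬ ((c == Mfold tl c && Mfold tl c != 1) = true) by
            simp only [Bool.and_eq_true, beq_iff_eq, bne_iff_ne]
            rintro ⟨h1, h2⟩
            exact heq h1.symm)]
    · by_cases hcb : c = b ∧ 1 < c
      · obtain ⟨rfl, h1c⟩ := hcb
        rw [show stepS (c, r) (k, c) = (c, r ++ [k]) from by simp [stepS, h1c]]
        have hmaxbc : max c c = c := by omega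
        rw [ih c (r ++ [k]) hposT (by omega) (by omega)]
        have hMbig : c ≤ Mfold tl c := Mfold_le_init tl c
        have hMne1 : Mfold tl c ≠ 1 := by omega
        rw [hM, hmaxbc]
        simp only [List.filter_cons]
        by_cases heq : Mfold tl c = c
        · rw [if_pos heq, if_pos heq,
            if_pos (show (c == Mfold tl c && Mfold tl c != 1) = true by
              simp only [Bool.and_eq_true, beq_iff_eq, bne_iff_ne]
              omega)]
          simp
        · rw [if_neg heq, if_neg heq,
            if_neg (show ¬ ((c == Mfold tl c && Mfold tl c != 1) = true) by
              simp only [Bool.and_eq_true, beq_iff_eq, bne_iff_ne]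
              rintro ⟨h1, h2⟩
              exact heq h1.symm)]
      · have hcleb : c ≤ b := by omega
        have hsmall : c < b ∨ (c = b ∧ c = 1) := by
          rcases lt_or_eq_of_le hcleb with hl | he
          · left; exact hl
          · right
            refine ⟨he, ?_⟩
            by_contra hc'
            exact hcb ⟨he, by omega⟩
        have hstep : stepS (b, r) (k, c) = (b, r) := by
          simp only [stepS]
          rw [if_neg (by omega)]
          rw [if_neg (show ¬ ((c == b && 1 < c) = true) by
            simp only [Bool.and_eq_true, beq_iff_eq, decide_eq_true_eq]
            rintro ⟨h1, h2⟩
            rcases hsmall with h | ⟨_, h⟩ <;> omega)]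
        rw [hstep]
        have hmaxbc : max b c = b := by omega
        rw [ih b r hposT hb hb1]
        have hMbig : b ≤ Mfold tl b := Mfold_le_init tl b
        rw [hM, hmaxbc]
        simp only [List.filter_cons]
        rw [if_neg (show ¬ ((c == Mfold tl b && Mfold tl b != 1) = true) by
          simp only [Bool.and_eq_true, beq_iff_eq, bne_iff_ne]
          rintro ⟨h1, h2⟩
          rcases hsmall with h | ⟨hbe, hce⟩ <;> omega)]

-- ---- linking the two per-course computations ----

-- the sort in the port (core List LT instance) equals the same sort under the
-- LinearOrder instances the order lemmas are stated with (Decidable is a subsingleton)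
lemma sorted_inst_bridge (l : List (List Char)) :
    @PySem.List.sorted (List Char) (List Char) List.instLT (fun a b => a.decidableLT b)
        l (fun t => t) false
      = @PySem.List.sorted (List Char) (List Char) List.instLinearOrder.toLT
          (@LinearOrder.toDecidableLT (List Char) _) l (fun t => t) false := by
  have hd : (fun (a b : List Char) => a.decidableLT b)
      = @LinearOrder.toDecidableLT (List Char) _ :=
    funext fun a => funext fun b => Subsingleton.elim _ _
  rw [hd]

lemma strm_perm (orders : List String) (r : Nat) :
    (strm (PySem.List.sorted orders (fun x => PySem.Str.len x)) r).Perm (strm orders r) :=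
  (PySem.List.sorted_perm orders (fun x => PySem.Str.len x) false).flatMap_right _

-- A's items list is a permutation of the runs of B's sorted combo list
lemma items_perm_runs (orders : List String) (course : Int) (h0 : 0 ≤ course) :
    (combDictA (foodsA orders) course).items.Perm
      (runsL (PySem.List.sorted (combosB (foodsB orders) course) (fun t => t))) := by
  set SA := strm (PySem.List.sorted orders (fun x => PySem.Str.len x)) course.toNat with hSA
  set L := PySem.List.sorted (combosB (foodsB orders) course) (fun t => t) with hL
  have hLs : L.Pairwise (· ≤ ·) := by
    rw [hL, sorted_inst_bridge]
    exact PySem.List.sorted_pairwise (combosB (foodsB orders) course) (fun t => t)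
  have hLperm : L.Perm SA := by
    rw [hL, hSA]
    exact ((PySem.List.sorted_perm _ _ false).trans
      ((combosB_eq_strm orders course h0) ▸ (strm_perm orders course.toNat).symm))
  rw [combDictA_eq_counter orders course h0, PySem.Dict.items_counter]
  have hitemsnd : ((PySem.Set.ofList SA).map
      (fun k => (k, ((SA.count k : Nat) : Int)))).Nodup :=
    (PySem.Set.nodup_ofList _).map (fun a b hab => congrArg Prod.fst hab)
  rw [List.perm_ext_iff_of_nodup hitemsnd (runsL_nodup L hLs)]
  rintro ⟨k, c⟩
  rw [runsL_mem_iff L hLs k c]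
  simp only [List.mem_map, PySem.Set.mem_ofList, Prod.mk.injEq]
  constructor
  · rintro ⟨k', hk', rfl, rfl⟩
    exact ⟨hLperm.mem_iff.mpr hk', by rw [hLperm.count_eq]⟩
  · rintro ⟨hkm, rfl⟩
    exact ⟨k, hLperm.mem_iff.mp hkm, rfl, by rw [hLperm.count_eq]⟩

lemma gA_perm_gB (orders : List String) (course : Int) (h0 : 0 ≤ course) :
    (gA orders course).Perm (gB orders course) := by
  have hip := items_perm_runs orders course h0
  set L := PySem.List.sorted (combosB (foodsB orders) course) (fun t => t) with hL
  have hLs : L.Pairwise (· ≤ ·) := by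
    rw [hL, sorted_inst_bridge]
    exact PySem.List.sorted_pairwise (combosB (foodsB orders) course) (fun t => t)
  have hpos : ∀ p ∈ runsL L, 1 ≤ p.2 := runsL_pos L
  simp only [gA, gB]
  rw [← hL, scanB_eq_foldl, foldl_stepS_spec (runsL L) 1 [] hpos le_rfl (fun _ => rfl)]
  by_cases hemp : (combDictA (foodsA orders) course).items.isEmpty
  · have hnil : (combDictA (foodsA orders) course).items = [] := List.isEmpty_iff.mp hemp
    have hr : runsL L = [] := (hnil ▸ hip).symm.eq_nil
    rw [if_pos hemp, hr]
    simp [Mfold]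
  · rw [if_neg hemp]
    have hne : (combDictA (foodsA orders) course).items ≠ [] := by
      intro h; rw [h] at hemp; exact hemp rfl
    -- mx = max of the values; show Mfold (runsL L) 1 = mx
    have hvals : (combDictA (foodsA orders) course).values
        = (combDictA (foodsA orders) course).items.map (fun kv => kv.2) := rfl
    rcases hmx : PySem.List.max? (combDictA (foodsA orders) course).values (fun v => v)
      with _ | mx
    · rw [hvals, PySem.List.max?_eq_none_iff] at hmx
      exact absurd (List.map_eq_nil_iff.mp hmx) hne
    · have hmxmem : mx ∈ (combDictA (foodsA orders) course).values :=
        PySem.List.max?_mem hmx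
      have hmxmax : ∀ v ∈ (combDictA (foodsA orders) course).values, v ≤ mx :=
        fun v hv => PySem.List.max?_isMax hmx v hv
      have hvperm : ((combDictA (foodsA orders) course).items.map (fun kv => kv.2)).Perm
          ((runsL L).map (fun kv => kv.2)) := hip.map _
      have hmx_mem' : ∃ p ∈ runsL L, p.2 = mx := by
        rw [hvals] at hmxmem
        obtain ⟨p, hp, hpe⟩ := List.mem_map.mp (hvperm.subset hmxmem)
        exact ⟨p, hp, hpe⟩
      have hmx_max' : ∀ p ∈ runsL L, p.2 ≤ mx := by
        intro p hp
        apply hmxmax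
        rw [hvals]
        exact hvperm.symm.subset (List.mem_map.mpr ⟨p, hp, rfl⟩)
      have hMeq : Mfold (runsL L) 1 = mx := by
        obtain ⟨p, hp, hpe⟩ := hmx_mem'
        have h1 : p.2 ≤ Mfold (runsL L) 1 := Mfold_mem_le (runsL L) 1 p hp
        have h2 : Mfold (runsL L) 1 = 1 ∨ ∃ q ∈ runsL L, Mfold (runsL L) 1 = q.2 :=
          Mfold_cases (runsL L) 1
        have hmx1 : 1 ≤ mx := le_trans (runsL_pos L p hp) (hpe ▸ le_rfl)
        rcases h2 with h | ⟨q, hq, hqe⟩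
        · omega
        · have := hmx_max' q hq
          omega
      rw [hMeq]
      have hmxs : mxsA (combDictA (foodsA orders) course)
          = ((combDictA (foodsA orders) course).items.filter
              (fun kv => kv.2 == mx && kv.2 != 1)).map (fun kv => String.ofList kv.1) := by
        unfold mxsA
        rw [hmx]
      rw [hmxs]
      have hfilter_eq : (runsL L).filter (fun kc => kc.2 == mx && mx != 1)
          = (runsL L).filter (fun kc => kc.2 == mx && kc.2 != 1) := by
        apply List.filter_congr
        intro kc _
        by_cases he : kc.2 = mx
        · rw [he]
        · have h1 : (kc.2 == mx) = false := by simpa using he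
          rw [h1, Bool.false_and, Bool.false_and]
      have hcomp : (String.ofList ∘ (Prod.fst : List Char × Int → List Char))
          = fun kv : List Char × Int => String.ofList kv.1 := rfl
      -- reduce the pair projection (definitional), then rewrite
      show (List.map (fun kv => String.ofList kv.1)
          ((combDictA (foodsA orders) course).items.filter
            (fun kv => kv.2 == mx && kv.2 != 1))).Perm
        (List.map String.ofList
          ((if mx = 1 then ([] : List (List Char)) else []) ++
            List.map Prod.fst ((runsL L).filter (fun kc => kc.2 == mx && mx != 1))))
      rw [hfilter_eq, ite_self, List.nil_append, List.map_map, hcomp]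
      exact (hip.filter _).map _

-- ===== VERDICT (by name: the statement is the Claim_ definition above) =====
theorem solution_spec : Claim_equal_solution := by
  intro orders courses _hdom hpre
  show solution orders courses = solution_alt orders courses
  rw [solution_eq_flatMap, alt_eq_flatMap]
  rcases hpre with h | h
  · subst h
    have hA : courses.flatMap (gA ([] : List String)) = [] := by
      simp only [List.flatMap_eq_nil_iff]
      intro c _
      rfl
    have hB : courses.flatMap (gB ([] : List String)) = [] := by
      simp only [List.flatMap_eq_nil_iff]
      intro c _
      show gB [] c = []
      unfold gB
      have hnil : PySem.List.sorted (combosB (foodsB []) c) (fun t => t) = [] :=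
        (PySem.List.sorted_eq_nil_iff _ _ _).mpr rfl
      rw [hnil]
      simp [scanB]
    rw [hA, hB]
  · exact PySem.List.sorted_eq_sorted_of_perm _ _ _ (fun a b hab => hab)
      (List.Perm.flatMap_left courses (fun c hcmem => gA_perm_gB orders c (h c hcmem)))
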